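-- pv_equiv track=rewrite | github.com/cristiandel48-spec/ingeanclajes2 | fix_all_bt.py | convert_tl_inner
-- ===== SOURCE A (Python) =====
-- def convert_tl_inner(inner):
--     """Convert template literal inner text to JS string concatenation parts."""
--     parts = []
--     i = 0
--     cur = ''
--     while i < len(inner):
--         if inner[i:i+2] == '${':
--             depth = 1; j = i+2
--             while j < len(inner) and depth > 0:
--                 if inner[j] == '{': depth += 1
--                 elif inner[j] == '}': depth -= 1
--                 j += 1
--             expr = inner[i+2:j-1]
--             if cur:
--                 parts.append("'" + cur.replace('\\', '\\\\').replace("'", "\\'") + "'")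
--                 cur = ''
--             parts.append('(' + expr + ')')
--             i = j
--         else:
--             cur += inner[i]; i += 1
--     if cur:
--         parts.append("'" + cur.replace('\\', '\\\\').replace("'", "\\'") + "'")
--     if not parts: return "''"
--     return ' + '.join(parts)
-- ===== SOURCE B (Python) =====
-- def _quote(s):
--     return "'" + s.replace('\\', '\\\\').replace("'", "\\'") + "'"
--
-- def convert_tl_inner(inner):
--     """Convert template literal inner text to JS string concatenation parts."""
--     parts = []
--     i = 0
--     n = len(inner)
--     while i < n:
--         pos = inner.find('${', i)
--         if pos == -1:
--             if i < n:
--                 parts.append(_quote(inner[i:]))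
--             break
--         if pos > i:
--             parts.append(_quote(inner[i:pos]))
--         depth = 1
--         j = pos + 2
--         while j < n and depth > 0:
--             ch = inner[j]
--             if ch == '{':
--                 depth += 1
--             elif ch == '}':
--                 depth -= 1
--             j += 1
--         parts.append('(' + inner[pos + 2:j - 1] + ')')
--         i = j
--     if not parts:
--         return "''"
--     return ' + '.join(parts)
-- ===== Notes on version B (the rewrite author's own statement) =====
-- stated objective: faster
-- what changed: B replaces A's character-by-character scan with string-accumulation by str.find locating each interpolation start so whole literal segments are sliced out in one step, scanning per character only inside braces for depth matching.
import Mathlib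
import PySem

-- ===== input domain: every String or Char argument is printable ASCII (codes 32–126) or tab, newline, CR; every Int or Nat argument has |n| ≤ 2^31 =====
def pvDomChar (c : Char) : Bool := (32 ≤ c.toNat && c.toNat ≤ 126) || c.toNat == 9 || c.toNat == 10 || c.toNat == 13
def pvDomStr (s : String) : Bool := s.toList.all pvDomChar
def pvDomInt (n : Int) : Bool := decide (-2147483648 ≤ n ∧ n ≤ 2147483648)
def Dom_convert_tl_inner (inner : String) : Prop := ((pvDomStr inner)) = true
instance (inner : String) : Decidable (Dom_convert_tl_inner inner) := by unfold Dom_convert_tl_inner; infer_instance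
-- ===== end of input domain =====

-- B rewrites A's per-character accumulation as whole-segment slicing via str.find; objective: faster (constant-factor).

-- shared helper: cur.replace('\\','\\\\').replace("'","\\'"), then wrap in quotes
def pvQuote (s : List Char) : String :=
  String.ofList ('\'' :: ((s.flatMap (fun c => if c = '\\' then ['\\', '\\'] else [c])).flatMap
    (fun c => if c = '\'' then ['\\', '\''] else [c])) ++ ['\''])

-- shared helper: the inner `while j < len(inner) and depth > 0` brace scan of both Pythons
-- (returns the consumed characters and the rest; expr = consumed.dropLast)
def pvBraceScan : List Char → Int → List Char × List Char
  | [], _ => ([], [])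
  | c :: rest, depth =>
    let d := if c = '{' then depth + 1 else if c = '}' then depth - 1 else depth
    if d > 0 then
      (c :: (pvBraceScan rest d).1, (pvBraceScan rest d).2)
    else ([c], rest)

theorem pvBraceScan_len (cs : List Char) (d : Int) : (pvBraceScan cs d).2.length ≤ cs.length := by
  fun_induction pvBraceScan cs d <;> simp_all;exact Nat.le_succ_of_le (by assumption)

-- ===== PORT A =====
-- A's main while loop: i replaced by the remaining characters, cur/parts as in the Python
def pvLoopA : List Char → List Char → List String → List String
  | [], cur, parts => if cur.isEmpty then parts else parts ++ [pvQuote cur]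
  | c :: rest, cur, parts =>
    if c = '$' ∧ rest.head? = some '{' then
      let p := pvBraceScan rest.tail 1
      let parts1 := if cur.isEmpty then parts else parts ++ [pvQuote cur]
      pvLoopA p.2 [] (parts1 ++ [String.ofList ('(' :: p.1.dropLast ++ [')'])])
    else pvLoopA rest (cur ++ [c]) parts
  termination_by cs _ _ => cs.length
  decreasing_by
  · have h1 := pvBraceScan_len rest.tail 1
    have h2 : rest.tail.length ≤ rest.length := by cases rest <;> simp
    simp only [List.length_cons]; omega
  · simp

def convert_tl_inner (inner : String) : String :=
  let parts := pvLoopA inner.toList [] []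
  if parts.isEmpty then "''" else PySem.Str.join " + " parts

-- ===== PORT B =====
-- inner.find('${', i) together with the slice inner[i:pos]: the literal before the
-- first '${' and the characters after it (none if '${' does not occur)
def pvFindDollar : List Char → Option (List Char × List Char)
  | [] => none
  | c :: rest =>
    if c = '$' ∧ rest.head? = some '{' then some ([], rest.tail)
    else
      match pvFindDollar rest with
      | none => none
      | some (p, r) => some (c :: p, r)

theorem pvFindDollar_len (cs : List Char) : ∀ p r, pvFindDollar cs = some (p, r) → r.length + 1 ≤ cs.length := by
  induction cs with
  | nil => intro p r h; simp [pvFindDollar] at h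
  | cons c rest ih =>
    intro p r h
    rw [pvFindDollar] at h
    split at h
    · rename_i hc
      simp only [Option.some.injEq, Prod.mk.injEq] at h
      obtain ⟨-, hr⟩ := h; subst hr
      obtain ⟨-, hh⟩ := hc
      cases rest with
      | nil => simp at hh
      | cons b bs => simp
    · cases hfd : pvFindDollar rest with
      | none => simp [hfd] at h
      | some pr =>
        obtain ⟨p', r'⟩ := pr
        simp only [hfd, Option.some.injEq, Prod.mk.injEq] at h
        obtain ⟨-, hr⟩ := h; subst hr
        exact Nat.le_succ_of_le (ih _ _ hfd)

-- B's main while loop: slice off the literal segment up to the next '${' in one step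
def pvLoopB : List Char → List String → List String
  | cs, parts =>
    match h : pvFindDollar cs with
    | none => if cs.isEmpty then parts else parts ++ [pvQuote cs]
    | some (lit, rest) =>
      let parts1 := if lit.isEmpty then parts else parts ++ [pvQuote lit]
      let p := pvBraceScan rest 1
      pvLoopB p.2 (parts1 ++ [String.ofList ('(' :: p.1.dropLast ++ [')'])])
  termination_by cs _ => cs.length
  decreasing_by
    have h1 := pvFindDollar_len cs lit rest h
    have h2 := pvBraceScan_len rest 1
    omega

def convert_tl_inner_alt (inner : String) : String :=
  let parts := pvLoopB inner.toList []
  if parts.isEmpty then "''" else PySem.Str.join " + " parts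

-- ===== PRECONDITION & SPEC =====
def Spec_convert_tl_inner (inner : String) (out : String) : Prop := out = convert_tl_inner_alt inner
instance (inner : String) (out : String) : Decidable (Spec_convert_tl_inner inner out) := by unfold Spec_convert_tl_inner; infer_instance

-- ===== CLAIM (what is proved, stated in full; the proofs are below) =====
def Claim_equal_convert_tl_inner : Prop := ∀ (inner : String), Dom_convert_tl_inner inner → Spec_convert_tl_inner inner (convert_tl_inner inner)

-- ===== LEMMAS AND PROOFS =====

-- A with pending literal `cur` computes the same as one find-step of B with `cur` prepended
theorem pvLoopA_eq (n : ℕ) : ∀ cs : List Char, cs.length ≤ n → ∀ cur parts,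
    pvLoopA cs cur parts =
      match pvFindDollar cs with
      | none => if (cur ++ cs).isEmpty then parts else parts ++ [pvQuote (cur ++ cs)]
      | some (lit, rest) =>
        let parts1 := if (cur ++ lit).isEmpty then parts else parts ++ [pvQuote (cur ++ lit)]
        let p := pvBraceScan rest 1
        pvLoopB p.2 (parts1 ++ [String.ofList ('(' :: p.1.dropLast ++ [')'])]) := by
  induction n with
  | zero =>
    intro cs hcs cur parts
    rw [List.length_eq_zero_iff.mp (Nat.le_zero.mp hcs)]
    simp [pvLoopA, pvFindDollar]
  | succ n ih =>
    intro cs hcs cur parts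
    cases cs with
    | nil => simp [pvLoopA, pvFindDollar]
    | cons c rest =>
      by_cases hc : c = '$' ∧ rest.head? = some '{'
      · rw [pvLoopA, if_pos hc]
        simp only [pvFindDollar, if_pos hc]
        have hlen : (pvBraceScan rest.tail 1).2.length ≤ n := by
          have h1 := pvBraceScan_len rest.tail 1
          have h2 : rest.tail.length ≤ rest.length := rest.length_tail.trans_le (Nat.sub_le _ _)
          simp at hcs; omega
        rw [ih _ hlen [] _]
        rw [pvLoopB]
        cases hfd : pvFindDollar (pvBraceScan rest.tail 1).2 with
        | none => simp
        | some pr => obtain ⟨p', r'⟩ := pr; simp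
      · rw [pvLoopA, if_neg hc]
        simp only [pvFindDollar, if_neg hc]
        have hlen : rest.length ≤ n := by simp at hcs; omega
        rw [ih rest hlen (cur ++ [c]) parts]
        cases hfd : pvFindDollar rest with
        | none => simp
        | some pr => obtain ⟨p, r⟩ := pr; simp

theorem pvLoopA_eq_pvLoopB (cs : List Char) (parts : List String) :
    pvLoopA cs [] parts = pvLoopB cs parts := by
  rw [pvLoopA_eq cs.length cs le_rfl [] parts, pvLoopB]
  cases hfd : pvFindDollar cs with
  | none => simp
  | some pr => obtain ⟨p, r⟩ := pr; simp

-- ===== VERDICT (by name: the statement is the Claim_ definition above) =====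
theorem convert_tl_inner_spec : Claim_equal_convert_tl_inner := by
  intro inner _
  unfold Spec_convert_tl_inner convert_tl_inner convert_tl_inner_alt
  rw [pvLoopA_eq_pvLoopB]
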